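-- pv_equiv track=rewrite | github.com/ma-za-kpe/fast_api_clerk_auth | app/services/email_security_service.py | _is_role_based_email
-- ===== SOURCE A (Python) =====
-- def _is_role_based_email(local_part: str) -> bool:
--     """
--     Check if email is role-based (admin@, support@, etc.)
--     """
--     role_prefixes = {
--         'admin', 'administrator', 'webmaster', 'postmaster',
--         'support', 'help', 'contact', 'sales', 'info',
--         'marketing', 'noreply', 'no-reply', 'donotreply',
--         'abuse', 'spam', 'privacy', 'security',
--         'hostmaster', 'usenet', 'news', 'www',
--         'ftp', 'mail', 'email', 'test', 'testing'
--     }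
--
--     local_lower = local_part.lower()
--     return local_lower in role_prefixes or any(
--         local_lower.startswith(prefix) for prefix in role_prefixes
--     )
-- ===== SOURCE B (Python) =====
-- ROLE_PREFIX_WORDS = (
--     "admin administrator webmaster postmaster support help contact sales info "
--     "marketing noreply no-reply donotreply abuse spam privacy security "
--     "hostmaster usenet news www ftp mail email test testing"
-- )
--
--
-- def _is_role_based_email(local_part: str) -> bool:
--     """
--     Check if email is role-based (admin@, support@, etc.)
--
--     Tries one fixed-length slice of the lowercased local part per possible
--     prefix length (3..13) against a flat set of the role words.
--     """
--     prefixes = set(ROLE_PREFIX_WORDS.split())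
--     s = local_part.lower()
--     return any(s[:n] in prefixes for n in range(3, 14))
-- ===== Notes on version B (the rewrite author's own statement) =====
-- stated objective: alternative
-- what changed: Instead of A's scan over all 26 role prefixes (an exact set membership test plus a startswith per prefix), B splits a single word string into one flat set and tests, for each possible prefix length n in range(3,14), whether the fixed-length slice local_part.lower()[:n] is in that set.
import Mathlib
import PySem

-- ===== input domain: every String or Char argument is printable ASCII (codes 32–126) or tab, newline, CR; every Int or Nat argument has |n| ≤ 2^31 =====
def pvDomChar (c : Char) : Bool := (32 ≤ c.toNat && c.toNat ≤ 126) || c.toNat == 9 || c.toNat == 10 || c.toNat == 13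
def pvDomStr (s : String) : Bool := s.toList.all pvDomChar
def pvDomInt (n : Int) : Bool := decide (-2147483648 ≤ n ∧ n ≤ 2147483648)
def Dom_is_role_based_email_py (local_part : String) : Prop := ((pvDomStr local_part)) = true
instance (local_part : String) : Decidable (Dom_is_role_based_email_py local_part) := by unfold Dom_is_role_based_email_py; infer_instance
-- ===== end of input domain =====

-- B replaces A's scan over all 26 role prefixes (exact membership plus a startswith per prefix)
-- by eleven fixed-length slice lookups: for each possible prefix length 3..13 it tests the slice
-- of that length of the lowercased local part against one flat set of the role words.

-- ===== PORT A =====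
def is_role_based_email_py (local_part : String) : Bool :=
  let role_prefixes : PySem.Set (List Char) := PySem.Set.ofList
    ["admin".toList, "administrator".toList, "webmaster".toList, "postmaster".toList,
     "support".toList, "help".toList, "contact".toList, "sales".toList, "info".toList,
     "marketing".toList, "noreply".toList, "no-reply".toList, "donotreply".toList,
     "abuse".toList, "spam".toList, "privacy".toList, "security".toList,
     "hostmaster".toList, "usenet".toList, "news".toList, "www".toList,
     "ftp".toList, "mail".toList, "email".toList, "test".toList, "testing".toList]
  let local_lower := PySem.Chars.lower local_part.toList
  PySem.Set.contains role_prefixes local_lower ||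
    role_prefixes.any (fun pfx => PySem.Chars.startswith local_lower pfx)

-- ===== PORT B =====
-- B carries the role words as one whitespace-joined string and splits it (str.split()).
def pvRoleWords : String :=
  "admin administrator webmaster postmaster support help contact sales info marketing noreply no-reply donotreply abuse spam privacy security hostmaster usenet news www ftp mail email test testing"

def is_role_based_email_py_alt (local_part : String) : Bool :=
  let prefixes : PySem.Set (List Char) := PySem.Set.ofList (PySem.Chars.split₀ pvRoleWords.toList)
  let s := PySem.Chars.lower local_part.toList
  (PySem.List.pyRange 3 14 1).any
    (fun n => PySem.Set.contains prefixes (PySem.List.slice s none (some n)))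

-- ===== PRECONDITION & SPEC =====
def Spec_is_role_based_email_py (local_part : String) (out : Bool) : Prop := out = is_role_based_email_py_alt local_part
instance (local_part : String) (out : Bool) : Decidable (Spec_is_role_based_email_py local_part out) := by unfold Spec_is_role_based_email_py; infer_instance

-- ===== CLAIM (what is proved, stated in full; the proofs are below) =====
def Claim_equal_is_role_based_email_py : Prop := ∀ (local_part : String), Dom_is_role_based_email_py local_part → Spec_is_role_based_email_py local_part (is_role_based_email_py local_part)

-- ===== LEMMAS AND PROOFS =====
-- the shared prefix list, for the proof only
def pvS : List (List Char) :=
  ["admin".toList, "administrator".toList, "webmaster".toList, "postmaster".toList,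
   "support".toList, "help".toList, "contact".toList, "sales".toList, "info".toList,
   "marketing".toList, "noreply".toList, "no-reply".toList, "donotreply".toList,
   "abuse".toList, "spam".toList, "privacy".toList, "security".toList,
   "hostmaster".toList, "usenet".toList, "news".toList, "www".toList,
   "ftp".toList, "mail".toList, "email".toList, "test".toList, "testing".toList]

-- A's exact-membership test is subsumed by its startswith scan (a string starts with itself).
theorem pv_absorb (L : List (List Char)) (ll : List Char) :
    (L.contains ll || L.any (fun p => PySem.Chars.startswith ll p)) =
      L.any (fun p => PySem.Chars.startswith ll p) := by
  cases h : L.contains ll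
  · simp
  · simp only [Bool.true_or]
    exact (List.any_eq_true.mpr ⟨ll, List.contains_iff_mem.mp h,
      (PySem.Chars.startswith_iff ll ll).mpr (List.prefix_refl ll)⟩).symm

-- every role word has length 3..13
theorem pv_lens : ∀ p ∈ pvS, (3 : Int) ≤ p.length ∧ (p.length : Int) < 14 := by decide

set_option maxHeartbeats 1000000 in
set_option maxRecDepth 4000 in
theorem pv_main (ll : List Char) :
    (PySem.Set.contains (PySem.Set.ofList pvS) ll ||
      (PySem.Set.ofList pvS).any (fun pfx => PySem.Chars.startswith ll pfx)) =
    (PySem.List.pyRange 3 14 1).any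
      (fun n => PySem.Set.contains (PySem.Set.ofList (PySem.Chars.split₀ pvRoleWords.toList))
        (PySem.List.slice ll none (some n))) := by
  rw [show PySem.Set.ofList pvS = pvS from by decide,
      show PySem.Set.ofList (PySem.Chars.split₀ pvRoleWords.toList) = pvS from by decide,
      show PySem.Set.contains pvS ll = pvS.contains ll from rfl, pv_absorb]
  rw [Bool.eq_iff_iff, List.any_eq_true, List.any_eq_true]
  constructor
  · rintro ⟨p, hp, hsw⟩
    refine ⟨(p.length : Int), (PySem.List.mem_pyRange_one).mpr (pv_lens p hp), ?_⟩
    rw [PySem.List.slice_to_natCast, PySem.Set.contains_iff]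
    have := (List.prefix_iff_eq_take).mp ((PySem.Chars.startswith_iff ll p).mp hsw)
    rwa [← this]
  · rintro ⟨n, hn, hc⟩
    obtain ⟨h3, _⟩ := (PySem.List.mem_pyRange_one).mp hn
    rw [PySem.List.slice_to ll (by omega : (0:Int) ≤ n), PySem.Set.contains_iff] at hc
    exact ⟨ll.take n.toNat, hc,
      (PySem.Chars.startswith_iff ll (ll.take n.toNat)).mpr (List.take_prefix _ ll)⟩

-- ===== VERDICT (by name: the statement is the Claim_ definition above) =====
theorem is_role_based_email_py_spec : Claim_equal_is_role_based_email_py := by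
  intro s _
  unfold Spec_is_role_based_email_py is_role_based_email_py is_role_based_email_py_alt
  exact pv_main (PySem.Chars.lower s.toList)
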